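-- pv_equiv track=rewrite | github.com/taggedzi/rhythmslicer | src/rhythm_slicer/visualizations/hackscope.py | locate_phase
-- ===== SOURCE A (Python) =====
-- def locate_phase(
--     global_frame: int, phases: list[tuple[str, int]]
-- ) -> tuple[str, int]:
--     remaining = max(0, int(global_frame))
--     for name, count in phases:
--         if remaining < count:
--             return name, remaining
--         remaining -= count
--     if phases:
--         name, count = phases[-1]
--         return name, max(0, count - 1)
--     return "IDLE", remaining
-- ===== SOURCE B (Python) =====
-- def locate_phase(global_frame, phases):
--     remaining = max(0, int(global_frame))
--     bounds = [0]
--     for _, count in phases: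
--         bounds.append(bounds[-1] + count)
--     hit = next(
--         ((name, remaining - lo)
--          for (name, _), lo, hi in zip(phases, bounds, bounds[1:])
--          if remaining < hi),
--         None,
--     )
--     if hit is not None:
--         return hit
--     if phases:
--         name, count = phases[-1]
--         return name, max(0, count - 1)
--     return "IDLE", remaining
-- ===== Notes on version B (the rewrite author's own statement) =====
-- stated objective: alternative
-- what changed: B precomputes the list of cumulative frame boundaries and locates the phase by a first-match search over consecutive boundary intervals (returning remaining minus the lower boundary), instead of A's loop that destructively decrements a remaining counter phase by phase.
import Mathlib
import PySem

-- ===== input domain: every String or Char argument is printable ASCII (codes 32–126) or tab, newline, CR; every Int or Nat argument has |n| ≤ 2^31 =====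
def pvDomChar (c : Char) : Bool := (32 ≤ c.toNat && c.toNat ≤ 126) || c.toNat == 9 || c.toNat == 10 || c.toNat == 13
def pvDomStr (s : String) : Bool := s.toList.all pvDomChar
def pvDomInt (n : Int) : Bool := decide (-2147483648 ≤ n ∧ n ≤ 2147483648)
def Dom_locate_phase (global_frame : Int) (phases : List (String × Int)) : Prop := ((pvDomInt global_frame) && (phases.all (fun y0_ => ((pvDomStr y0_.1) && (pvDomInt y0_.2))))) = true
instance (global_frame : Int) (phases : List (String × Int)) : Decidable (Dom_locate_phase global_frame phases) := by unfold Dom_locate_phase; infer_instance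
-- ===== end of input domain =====

-- B replaces A's decrementing-counter scan by a precomputed cumulative-boundary table
-- searched for the first containing interval (objective: alternative; same cost).

-- ===== PORT A =====
-- the 'for name, count in phases' loop with its early return; none = loop fell through
def locate_phase_loop (remaining : Int) : List (String × Int) → Option (String × Int)
  | [] => none
  | (name, count) :: rest =>
      if remaining < count then some (name, remaining)
      else locate_phase_loop (remaining - count) rest

def locate_phase (global_frame : Int) (phases : List (String × Int)) : String × Int :=
  let remaining := max 0 global_frame
  match locate_phase_loop remaining phases with
  | some r => r
  | none =>
      match phases.getLast? with   -- 'if phases: name, count = phases[-1]'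
      | some (name, count) => (name, max 0 (count - 1))
      | none => ("IDLE", remaining)

-- ===== PORT B =====
-- 'bounds = [0]; for _, count in phases: bounds.append(bounds[-1] + count)'
def lp_bounds (acc : Int) : List Int → List Int
  | [] => [acc]
  | c :: rest => acc :: lp_bounds (acc + c) rest

-- the generator 'next(((name, remaining - lo) for (name,_), lo, hi in zip(phases, bounds, bounds[1:]) if remaining < hi), None)'
def lp_hit (remaining : Int) (rows : List ((String × Int) × (Int × Int))) : Option (String × Int) :=
  rows.findSome? (fun x => if remaining < x.2.2 then some (x.1.1, remaining - x.2.1) else none)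

def locate_phase_alt (global_frame : Int) (phases : List (String × Int)) : String × Int :=
  let remaining := max 0 global_frame
  let bounds := lp_bounds 0 (phases.map Prod.snd)
  match lp_hit remaining (phases.zip (bounds.zip bounds.tail)) with
  | some r => r
  | none =>
      match phases.getLast? with
      | some (name, count) => (name, max 0 (count - 1))
      | none => ("IDLE", remaining)

-- ===== PRECONDITION & SPEC =====
def Spec_locate_phase (global_frame : Int) (phases : List (String × Int)) (out : String × Int) : Prop := out = locate_phase_alt global_frame phases
instance (global_frame : Int) (phases : List (String × Int)) (out : String × Int) : Decidable (Spec_locate_phase global_frame phases out) := by unfold Spec_locate_phase; infer_instance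

-- ===== CLAIM (what is proved, stated in full; the proofs are below) =====
def Claim_equal_locate_phase : Prop := ∀ (global_frame : Int) (phases : List (String × Int)), Dom_locate_phase global_frame phases → Spec_locate_phase global_frame phases (locate_phase global_frame phases)

-- ===== LEMMAS AND PROOFS =====
-- B's interval search over boundaries starting at lo equals A's loop on remaining - lo.
theorem lp_hit_eq_loop (phases : List (String × Int)) :
    ∀ (remaining lo : Int),
      lp_hit remaining
        (phases.zip ((lp_bounds lo (phases.map Prod.snd)).zip
                     (lp_bounds lo (phases.map Prod.snd)).tail))
      = locate_phase_loop (remaining - lo) phases := by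
  induction phases with
  | nil => intro remaining lo; simp [lp_bounds, lp_hit, locate_phase_loop]
  | cons p rest ih =>
      intro remaining lo
      obtain ⟨name, count⟩ := p
      cases rest with
      | nil =>
          simp only [List.map, lp_bounds, List.tail, List.zip, List.zipWith, lp_hit,
            List.findSome?, locate_phase_loop]
          by_cases h : remaining < lo + count
          · rw [if_pos h, if_pos (by omega : remaining - lo < count)]
          · rw [if_neg h, if_neg (by omega : ¬ remaining - lo < count)]
      | cons q rest' =>
          simp only [List.map, lp_bounds, List.tail, List.zip, List.zipWith, lp_hit,
            List.findSome?, locate_phase_loop]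
          by_cases h : remaining < lo + count
          · rw [if_pos h, if_pos (by omega : remaining - lo < count)]
          · rw [if_neg h, if_neg (by omega : ¬ remaining - lo < count)]
            have := ih remaining (lo + count)
            simp only [List.map, lp_bounds, List.tail, List.zip, lp_hit] at this
            rw [sub_sub]
            exact this

-- ===== VERDICT (by name: the statement is the Claim_ definition above) =====
theorem locate_phase_spec : Claim_equal_locate_phase := by
  intro global_frame phases _
  unfold Spec_locate_phase locate_phase locate_phase_alt
  have h := lp_hit_eq_loop phases (max 0 global_frame) 0
  simp only [sub_zero] at h
  simp only [h]
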